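-- pv_equiv track=rewrite | github.com/sschott20/Competitive-Programming | Codeforces Round 916 (Div. 3)/A.py | solve
-- ===== SOURCE A (Python) =====
-- def solve(test):
--     d = {}
--     acc = 0
--     ret = set()
--     for t in test:
--         tmp = ord(t) - ord("A") + 1
--         if tmp in d:
--             d[tmp] += 1
--         else:
--             d[tmp] = 1
--         if d[tmp] >= tmp:
--             ret.add(tmp)
--     return len(ret)
-- ===== SOURCE B (Python) =====
-- def solve(test):
--     s = sorted(test)
--     ans = 0
--     i = 0
--     n = len(s)
--     while i < n:
--         j = i + 1
--         while j < n and s[j] == s[i]: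
--             j += 1
--         if j - i >= ord(s[i]) - ord("A") + 1:
--             ans += 1
--         i = j
--     return ans
-- ===== Notes on version B (the rewrite author's own statement) =====
-- stated objective: alternative
-- what changed: A makes one interleaved pass maintaining a frequency dict keyed by the shifted ordinal plus a growing marker set and returns the set's size; B uses no hash structures at all: it sorts the characters and scans the sorted array run by run, counting runs whose length reaches the letter's threshold.
import Mathlib
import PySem

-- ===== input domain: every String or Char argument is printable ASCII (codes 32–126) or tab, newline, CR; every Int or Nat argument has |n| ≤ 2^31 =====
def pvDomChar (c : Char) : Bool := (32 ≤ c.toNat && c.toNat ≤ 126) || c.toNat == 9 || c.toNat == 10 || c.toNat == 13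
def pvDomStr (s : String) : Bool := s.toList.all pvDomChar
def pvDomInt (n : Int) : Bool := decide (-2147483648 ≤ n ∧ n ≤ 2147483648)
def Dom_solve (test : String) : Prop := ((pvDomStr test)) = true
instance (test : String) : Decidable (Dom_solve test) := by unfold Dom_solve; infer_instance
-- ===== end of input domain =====

-- B replaces A's hash-based interleaved count-and-mark loop (dict + growing marker set) by
-- sort-then-scan: sort the characters, walk the sorted array run by run, count qualifying runs.

-- ===== PORT A =====
-- one fold step of A's loop: update the per-value counter, mark tmp when its count reaches tmp
def solveStepA (st : PySem.Dict Int Int × PySem.Set Int) (t : Char) :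
    PySem.Dict Int Int × PySem.Set Int :=
  let tmp : Int := (t.toNat : Int) - 65 + 1
  let d := if st.1.contains tmp then st.1.insert tmp (st.1.getD tmp 0 + 1)
           else st.1.insert tmp 1
  let ret := if d.getD tmp 0 ≥ tmp then PySem.Set.add st.2 tmp else st.2
  (d, ret)

def solve (test : String) : Int :=
  let st := test.toList.foldl solveStepA (PySem.Dict.empty, PySem.Set.ofList [])
  (st.2.length : Int)

-- ===== PORT B =====
-- the outer while loop of Source B: consume one run of equal characters (the inner while),
-- add 1 when the run length reaches the letter's threshold, continue after the run
def runScan : List Char → Int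
  | [] => 0
  | c :: rest =>
    (if ((rest.takeWhile (fun x => x == c)).length + 1 : Int) ≥ (c.toNat : Int) - 65 + 1
     then (1 : Int) else 0) + runScan (rest.dropWhile (fun x => x == c))
termination_by l => l.length
decreasing_by
  simp only [List.length_cons]
  exact Nat.lt_succ_of_le (List.length_dropWhile_le _ rest)

def solve_alt (test : String) : Int :=
  runScan (PySem.List.sorted test.toList (fun c => c))

-- ===== PRECONDITION & SPEC =====
def Spec_solve (test : String) (out : Int) : Prop := out = solve_alt test
instance (test : String) (out : Int) : Decidable (Spec_solve test out) := by unfold Spec_solve; infer_instance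

-- ===== CLAIM (what is proved, stated in full; the proofs are below) =====
def Claim_equal_solve : Prop := ∀ (test : String), Dom_solve test → Spec_solve test (solve test)

-- ===== LEMMAS AND PROOFS =====

-- the value A assigns to a character
def gVal (c : Char) : Int := (c.toNat : Int) - 65 + 1

lemma gVal_injective : Function.Injective gVal := by
  intro a b h
  have h' : a.toNat = b.toNat := by unfold gVal at h; omega
  exact Char.ext (UInt32.toNat_inj.mp h')

-- loop invariant of A's fold: the dict counts the processed values, the set holds exactly
-- the values x that occurred and whose running count reached x
lemma solve_foldl_inv (l : List Char) :
    ∀ (m : List Int) (d : PySem.Dict Int Int) (ret : PySem.Set Int),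
      (∀ x, d.getD x 0 = (m.count x : Int)) →
      ret.Nodup →
      (∀ x, x ∈ ret ↔ x ∈ m ∧ x ≤ (m.count x : Int)) →
      (l.foldl solveStepA (d, ret)).2.Nodup ∧
      (∀ x, x ∈ (l.foldl solveStepA (d, ret)).2 ↔
        x ∈ m ++ l.map gVal ∧ x ≤ ((m ++ l.map gVal).count x : Int)) := by
  induction l with
  | nil => intro m d ret hd hnd hmem; simpa using ⟨hnd, hmem⟩
  | cons t l ih =>
    intro m d ret hd hnd hmem
    set tmp : Int := (t.toNat : Int) - 65 + 1 with htmp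
    have hbranchless : solveStepA (d, ret) t =
        (d.insert tmp (d.getD tmp 0 + 1),
         if (d.insert tmp (d.getD tmp 0 + 1)).getD tmp 0 ≥ tmp then PySem.Set.add ret tmp
         else ret) := by
      simp only [solveStepA, ← htmp]
      by_cases hc : d.contains tmp
      · simp [hc]
      · have h0 : d.getD tmp 0 = 0 :=
          PySem.Dict.getD_of_get?_eq_none d 0
            ((PySem.Dict.get?_eq_none_iff_contains d tmp).mpr (by simpa using hc))
        simp [hc, h0]
    have hfold : (t :: l).foldl solveStepA (d, ret) = l.foldl solveStepA (solveStepA (d, ret) t) := rfl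
    rw [hfold, hbranchless]
    set d1 := d.insert tmp (d.getD tmp 0 + 1) with hd1
    have hget1 : d1.getD tmp 0 = (m.count tmp : Int) + 1 := by
      rw [hd1, PySem.Dict.getD_insert_self, hd tmp]
    have hdict : ∀ x, d1.getD x 0 = ((m ++ [tmp]).count x : Int) := by
      intro x
      by_cases hx : x = tmp
      · subst hx; rw [hget1]; simp [List.count_append]
      · rw [hd1, PySem.Dict.getD_insert_of_ne _ _ _ hx, hd x]
        have hx' : tmp ≠ x := Ne.symm hx
        simp [List.count_append, hx']
    set ret1 := (if d1.getD tmp 0 ≥ tmp then PySem.Set.add ret tmp else ret) with hret1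
    have hnd1 : ret1.Nodup := by
      rw [hret1]; split
      · exact PySem.Set.nodup_add ret tmp hnd
      · exact hnd
    have hmem1 : ∀ x, x ∈ ret1 ↔ x ∈ m ++ [tmp] ∧ x ≤ ((m ++ [tmp]).count x : Int) := by
      intro x
      have hc2 : ((m ++ [tmp]).count tmp : Int) = (m.count tmp : Int) + 1 := by
        simp [List.count_append]
      by_cases hx : x = tmp
      · subst hx
        rw [hret1, hget1]
        by_cases hge : (m.count tmp : Int) + 1 ≥ tmp
        · rw [if_pos hge, PySem.Set.mem_add]
          simp [hge]
        · rw [if_neg hge, hmem tmp]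
          constructor
          · rintro ⟨_, hle⟩
            exact absurd (by omega : (m.count tmp : Int) + 1 ≥ tmp) hge
          · rintro ⟨_, hle⟩
            rw [hc2] at hle
            exact absurd hle hge
      · have hx' : tmp ≠ x := Ne.symm hx
        have hceq : ((m ++ [tmp]).count x : Int) = (m.count x : Int) := by
          simp [List.count_append, hx']
        have hmm : (x ∈ m ++ [tmp]) ↔ x ∈ m := by simp [hx]
        have hcnt0 : List.count x [tmp] = 0 := by simp [hx']
        rw [hret1]; split
        · rw [PySem.Set.mem_add]
          simp [hx, hmem x, hmm, List.count_append, hcnt0]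
        · rw [hmem x, hceq, hmm]
    have hrest := ih (m ++ [tmp]) d1 ret1 hdict hnd1 hmem1
    refine ⟨hrest.1, fun x => ?_⟩
    rw [hrest.2 x]
    have hg : gVal t = tmp := rfl
    simp [List.append_assoc, List.map_cons, hg]

-- A's final set is a permutation of the qualifying distinct values: its length is the countP
lemma solve_eq_countP (test : String) :
    solve test =
      ((PySem.Set.ofList test.toList).countP
        (fun c => decide (gVal c ≤ (test.toList.count c : Int))) : Int) := by
  classical
  set l := test.toList with hl
  have hempty : ∀ x : Int, (PySem.Dict.empty : PySem.Dict Int Int).getD x 0 =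
      (([] : List Int).count x : Int) := by
    intro x
    simp [PySem.Dict.getD_of_get?_eq_none]
  have hinv := solve_foldl_inv l [] PySem.Dict.empty (PySem.Set.ofList [])
    hempty (by simp) (by simp)
  obtain ⟨hnd, hmem⟩ := hinv
  simp only [List.nil_append] at hmem
  set p : Char → Bool := fun c => decide (gVal c ≤ (l.count c : Int)) with hp
  set T : List Char := (PySem.Set.ofList l).filter p with hT
  have hTnd : (T.map gVal).Nodup :=
    (List.Nodup.filter p (PySem.Set.nodup_ofList l)).map gVal_injective
  have hcount : ∀ c : Char, (l.map gVal).count (gVal c) = l.count c := fun c =>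
    List.count_map_of_injective l gVal gVal_injective c
  have hmemT : ∀ x, x ∈ T.map gVal ↔ x ∈ l.map gVal ∧ x ≤ ((l.map gVal).count x : Int) := by
    intro x
    constructor
    · rintro hx
      rcases List.mem_map.mp hx with ⟨c, hcT, hcx⟩
      rcases List.mem_filter.mp hcT with ⟨hcS, hpc⟩
      have hcl : c ∈ l := (PySem.Set.mem_ofList l c).mp hcS
      subst hcx
      refine ⟨List.mem_map_of_mem hcl, ?_⟩
      rw [hcount c]
      simpa [hp] using hpc
    · rintro ⟨hx, hle⟩
      rcases List.mem_map.mp hx with ⟨c, hcl, hcx⟩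
      subst hcx
      refine List.mem_map_of_mem (List.mem_filter.mpr ⟨(PySem.Set.mem_ofList l c).mpr hcl, ?_⟩)
      rw [hcount c] at hle
      simpa [hp] using hle
  have hperm : ((l.foldl solveStepA (PySem.Dict.empty, PySem.Set.ofList [])).2).Perm
      (T.map gVal) :=
    (List.perm_ext_iff_of_nodup hnd hTnd).mpr (fun x => by rw [hmem x, hmemT x])
  have hlen := hperm.length_eq
  simp only [solve]
  rw [← hl, hlen]
  simp [hT, hp, List.countP_eq_length_filter]

-- in a ≤-sorted list headed by c, c does not survive dropWhile (== c)
lemma not_mem_dropWhile_of_sorted (c : Char) (rest : List Char)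
    (hle : ∀ x ∈ rest, c ≤ x) (hp : rest.Pairwise (· ≤ ·)) :
    c ∉ rest.dropWhile (fun x => x == c) := by
  induction rest with
  | nil => simp
  | cons a rs ih =>
    by_cases ha : (a == c) = true
    · rw [List.dropWhile_cons, if_pos ha]
      exact ih (fun x hx => hle x (List.mem_cons_of_mem a hx)) (List.pairwise_cons.mp hp).2
    · rw [List.dropWhile_cons, if_neg ha]
      have hac : a ≠ c := by simpa using ha
      have hca : c < a := lt_of_le_of_ne (hle a List.mem_cons_self) (Ne.symm hac)
      intro hmem
      rcases List.mem_cons.mp hmem with h | h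
      · exact hac h.symm
      · have := (List.pairwise_cons.mp hp).1 c h
        exact absurd (lt_of_lt_of_le hca this) (lt_irrefl c)

-- run-scan of a ≤-sorted list counts the distinct characters whose multiplicity
-- reaches their threshold
lemma runScan_sorted : ∀ (n : Nat) (s : List Char), s.length ≤ n → s.Pairwise (· ≤ ·) →
    runScan s =
      ((PySem.Set.ofList s).countP (fun c => decide (gVal c ≤ (s.count c : Int))) : Int) := by
  intro n
  induction n with
  | zero =>
    intro s hlen _
    have : s = [] := List.eq_nil_of_length_eq_zero (Nat.le_zero.mp hlen)
    subst this
    simp [runScan]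
  | succ n ih =>
    intro s hlen hp
    cases s with
    | nil => simp [runScan]
    | cons c rest =>
      have hcle : ∀ x ∈ rest, c ≤ x := (List.pairwise_cons.mp hp).1
      have hprest : rest.Pairwise (· ≤ ·) := (List.pairwise_cons.mp hp).2
      set run := rest.takeWhile (fun x => x == c) with hrun
      set tail := rest.dropWhile (fun x => x == c) with htail
      have hsplit : rest = run ++ tail := (List.takeWhile_append_dropWhile).symm
      have hrunc : ∀ x ∈ run, x = c := by
        intro x hx
        have := List.mem_takeWhile_imp hx
        simpa using this
      have hcnot : c ∉ tail := not_mem_dropWhile_of_sorted c rest hcle hprest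
      have htsub : tail.Sublist rest := List.dropWhile_sublist _
      have hptail : tail.Pairwise (· ≤ ·) := hprest.sublist htsub
      have hlent : tail.length ≤ n := by
        have h1 : tail.length ≤ rest.length := htail ▸ List.length_dropWhile_le _ rest
        simp only [List.length_cons] at hlen
        omega
      -- count of c in the whole list is the run length + 1
      have hcount_c : (c :: rest).count c = run.length + 1 := by
        rw [hsplit, List.count_cons_self, List.count_append]
        have h1 : run.count c = run.length := by
          rw [List.count_eq_length]
          intro x hx; exact ((hrunc x hx) ▸ rfl : c = x).symm ▸ rfl
        have h2 : tail.count c = 0 := List.count_eq_zero.mpr hcnot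
        omega
      -- count of x ≠ c is unchanged by dropping the head and the run
      have hcount_ne : ∀ x, x ≠ c → (c :: rest).count x = tail.count x := by
        intro x hx
        have hrz : run.count x = 0 := List.count_eq_zero.mpr (fun hxr => hx (hrunc x hxr))
        have hx' : ¬ c = x := fun h => hx h.symm
        rw [hsplit]
        simp [List.count_append, hrz, hx']
      -- the distinct elements: Set.ofList (c :: rest) is a permutation of c :: Set.ofList tail
      have hnd1 : (PySem.Set.ofList (c :: rest)).Nodup := PySem.Set.nodup_ofList _
      have hnd2 : (c :: PySem.Set.ofList tail).Nodup := by
        refine List.nodup_cons.mpr ⟨?_, PySem.Set.nodup_ofList _⟩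
        intro hcm
        exact hcnot ((PySem.Set.mem_ofList tail c).mp hcm)
      have hmemiff : ∀ x, x ∈ PySem.Set.ofList (c :: rest) ↔ x ∈ c :: PySem.Set.ofList tail := by
        intro x
        rw [PySem.Set.mem_ofList]
        constructor
        · intro hx
          rcases List.mem_cons.mp hx with h | h
          · exact List.mem_cons.mpr (Or.inl h)
          · rw [hsplit] at h
            rcases List.mem_append.mp h with h' | h'
            · exact List.mem_cons.mpr (Or.inl (hrunc x h'))
            · exact List.mem_cons.mpr (Or.inr ((PySem.Set.mem_ofList tail x).mpr h'))
        · intro hx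
          rcases List.mem_cons.mp hx with h | h
          · exact h ▸ List.mem_cons_self
          · have : x ∈ tail := (PySem.Set.mem_ofList tail x).mp h
            exact List.mem_cons.mpr (Or.inr (hsplit ▸ List.mem_append.mpr (Or.inr this)))
      have hperm : (PySem.Set.ofList (c :: rest)).Perm (c :: PySem.Set.ofList tail) :=
        (List.perm_ext_iff_of_nodup hnd1 hnd2).mpr hmemiff
      set p : Char → Bool := fun x => decide (gVal x ≤ ((c :: rest).count x : Int)) with hpdef
      have hcntP : (PySem.Set.ofList (c :: rest)).countP p = (c :: PySem.Set.ofList tail).countP p :=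
        hperm.countP_eq p
      have hcongr : (PySem.Set.ofList tail).countP p =
          (PySem.Set.ofList tail).countP (fun x => decide (gVal x ≤ (tail.count x : Int))) := by
        refine List.countP_congr ?_
        intro x hx
        have hxt : x ∈ tail := (PySem.Set.mem_ofList tail x).mp hx
        have hxc : x ≠ c := fun h => hcnot (h ▸ hxt)
        simp [hpdef, hcount_ne x hxc]
      have hIH := ih tail hlent hptail
      have hpc : p c = decide (((run.length : Int) + 1) ≥ (c.toNat : Int) - 65 + 1) := by
        simp [hpdef, hcount_c, gVal, ge_iff_le]
      show runScan (c :: rest) = _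
      rw [runScan, ← hrun, ← htail, hcntP, List.countP_cons, hcongr]
      push_cast
      rw [← hIH, hpc]
      by_cases hq : ((run.length : Int) + 1) ≥ ((c.toNat : Int) - 65 + 1)
      · simp [add_comm]
      · simp [hq]

lemma solve_eq_solve_alt (test : String) : solve test = solve_alt test := by
  classical
  set l := test.toList with hl
  set s := PySem.List.sorted l (fun c => c) with hs
  have hperm : s.Perm l := PySem.List.sorted_perm l (fun c => c) false
  have hpair : s.Pairwise (fun a b => a ≤ b) := PySem.List.sorted_pairwise l (fun c => c)
  have hB := runScan_sorted s.length s (le_refl _) hpair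
  have hndS : (PySem.Set.ofList s).Nodup := PySem.Set.nodup_ofList s
  have hndL : (PySem.Set.ofList l).Nodup := PySem.Set.nodup_ofList l
  have hmem : ∀ x, x ∈ PySem.Set.ofList s ↔ x ∈ PySem.Set.ofList l := by
    intro x
    rw [PySem.Set.mem_ofList, PySem.Set.mem_ofList]
    exact hperm.mem_iff
  have hpermS : (PySem.Set.ofList s).Perm (PySem.Set.ofList l) :=
    (List.perm_ext_iff_of_nodup hndS hndL).mpr hmem
  have hcnt : ∀ x : Char, s.count x = l.count x := fun x => hperm.count_eq x
  have : (PySem.Set.ofList s).countP (fun c => decide (gVal c ≤ (s.count c : Int))) =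
      (PySem.Set.ofList l).countP (fun c => decide (gVal c ≤ (l.count c : Int))) := by
    rw [hpermS.countP_eq]
    refine List.countP_congr ?_
    intro x _
    simp [hcnt x]
  rw [solve_eq_countP, solve_alt, ← hl, ← hs, hB, this]

-- ===== VERDICT (by name: the statement is the Claim_ definition above) =====
theorem solve_spec : Claim_equal_solve := by
  intro test _
  unfold Spec_solve
  exact solve_eq_solve_alt test
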